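-- pv_equiv track=rewrite | github.com/bridaisies/cs330e-elements-of-software-engineering-1 | project2_diplomacy/Diplomacy.py | attacked
-- ===== SOURCE A (Python) =====
-- def attacked(att, city):
--     """
--     x is army that is attacking: city being attacked
--     city is location of army
--     """
--
--     a = {}
--     for x in att:
--         for y in city:
--             if (att.get(x) == city.get(y)):
--                 if ((y in a) == False):
--                     lst = []
--                 if (a == {}):
--                     lst = [x]
--                     a = {y:lst}
--                 else:
--                     if (a.get(y) == None):
--                         lst = [x]
--                     else:
--                         z = a.get(y)
--                         lst = z + [x]
--                     a.update({y: sorted(lst)})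
--
--     return a
-- ===== SOURCE B (Python) =====
-- def attacked(att, city):
--     # Index cities by their location once, then a single pass over the armies;
--     # each group is sorted once at the end.
--     by_loc = {}
--     for y, loc in city.items():
--         by_loc.setdefault(loc, []).append(y)
--     groups = {}
--     for x, loc in att.items():
--         for y in by_loc.get(loc, ()):
--             groups.setdefault(y, []).append(x)
--     return {y: sorted(xs) for y, xs in groups.items()}
-- ===== Notes on version B (the rewrite author's own statement) =====
-- stated objective: faster
-- what changed: Instead of A's nested scan over all army/city pairs with a per-pair dict lookup and a re-sort of the growing group on every match, B builds a location->cities index in one pass over city, makes one pass over att appending each army to its matching groups, and sorts each group exactly once at the end. Pre_ only excludes duplicate-key association lists, which denote no Python dict.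
import Mathlib
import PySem

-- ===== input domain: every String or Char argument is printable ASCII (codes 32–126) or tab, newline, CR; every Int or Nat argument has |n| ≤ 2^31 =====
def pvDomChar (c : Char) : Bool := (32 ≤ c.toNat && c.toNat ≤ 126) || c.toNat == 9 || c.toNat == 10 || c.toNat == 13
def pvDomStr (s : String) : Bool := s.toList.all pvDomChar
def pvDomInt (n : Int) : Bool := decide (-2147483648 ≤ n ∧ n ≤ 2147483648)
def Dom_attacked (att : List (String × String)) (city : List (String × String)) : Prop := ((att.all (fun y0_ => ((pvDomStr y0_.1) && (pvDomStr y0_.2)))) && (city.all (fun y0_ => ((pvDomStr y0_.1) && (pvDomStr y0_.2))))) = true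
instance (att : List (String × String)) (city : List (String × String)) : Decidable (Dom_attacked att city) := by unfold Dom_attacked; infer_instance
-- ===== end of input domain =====

-- B replaces A's nested army×city scan (with a re-sort of the growing group on every
-- match) by a location→cities index built once, a single pass over the armies, and one
-- final sort per group.

-- ===== PORT A =====
def attacked (att : List (String × String)) (city : List (String × String)) : List (String × List String) :=
  (att.foldl (fun a xp =>
     city.foldl (fun a yp =>
       if ((PySem.Dict.mk att).get? xp.1 == (PySem.Dict.mk city).get? yp.1) then
         -- Python's `if (y in a) == False: lst = []` binds lst, which is always
         -- reassigned before use in both branches below; nothing to port.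
         if a == (PySem.Dict.empty : PySem.Dict String (List String)) then
           PySem.Dict.ofList [(yp.1, [xp.1])]
         else
           let lst := match a.get? yp.1 with
             | none => [xp.1]
             | some z => z ++ [xp.1]
           a.insert yp.1 (PySem.List.sorted lst (fun s => s) false)
       else a) a)
   PySem.Dict.empty).items

-- ===== PORT B =====
def attacked_alt (att : List (String × String)) (city : List (String × String)) : List (String × List String) :=
  let byLoc : PySem.Dict String (List String) :=
    city.foldl (fun d yp => d.modify yp.2 [] (fun l => l ++ [yp.1])) PySem.Dict.empty
  let groups : PySem.Dict String (List String) :=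
    att.foldl (fun g xp =>
      (byLoc.getD xp.2 []).foldl (fun g y => g.modify y [] (fun l => l ++ [xp.1])) g)
      PySem.Dict.empty
  groups.items.map (fun p => (p.1, PySem.List.sorted p.2 (fun s => s) false))

-- ===== PRECONDITION & SPEC =====
-- Pre_ only excludes duplicate-key association lists, which denote no Python dict
-- (both parameters are Python dicts, so their key lists are necessarily distinct).
def Pre_attacked (att : List (String × String)) (city : List (String × String)) : Prop :=
  (att.map Prod.fst).Nodup ∧ (city.map Prod.fst).Nodup
instance (att : List (String × String)) (city : List (String × String)) : Decidable (Pre_attacked att city) := by unfold Pre_attacked; infer_instance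
def pvWitness_attacked : (List (String × String)) × (List (String × String)) :=
  ([("a", "L"), ("b", "L")], [("c", "L"), ("d", "M")])
def Spec_attacked (att : List (String × String)) (city : List (String × String)) (out : List (String × List String)) : Prop := out = attacked_alt att city
instance (att : List (String × String)) (city : List (String × String)) (out : List (String × List String)) : Decidable (Spec_attacked att city out) := by unfold Spec_attacked; infer_instance

-- ===== CLAIM (what is proved, stated in full; the proofs are below) =====
def Claim_equal_attacked : Prop := ∀ (att : List (String × String)) (city : List (String × String)), Dom_attacked att city → Pre_attacked att city → Spec_attacked att city (attacked att city)

-- ===== LEMMAS AND PROOFS =====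

-- sorted(list) with the identity key, as both Pythons use it
def pvSort1 (l : List String) : List String := PySem.List.sorted l (fun s => s) false

-- map `sorted` over the values of an items list / of a dict
def pvSortVals (l : List (String × List String)) : List (String × List String) :=
  l.map (fun p => (p.1, pvSort1 p.2))
def pvSortD (g : PySem.Dict String (List String)) : PySem.Dict String (List String) :=
  PySem.Dict.mk (pvSortVals g.items)

-- A's match-handling step, and B's
def pvAStep (a : PySem.Dict String (List String)) (y x : String) : PySem.Dict String (List String) :=
  if a == (PySem.Dict.empty : PySem.Dict String (List String)) then
    PySem.Dict.ofList [(y, [x])]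
  else
    let lst := match a.get? y with
      | none => [x]
      | some z => z ++ [x]
    a.insert y (PySem.List.sorted lst (fun s => s) false)
def pvBStep (g : PySem.Dict String (List String)) (y x : String) : PySem.Dict String (List String) :=
  g.modify y [] (fun l => l ++ [x])

theorem pvSort1_again (z : List String) (x : String) :
    pvSort1 (pvSort1 z ++ [x]) = pvSort1 (z ++ [x]) := by
  exact PySem.List.sorted_eq_sorted_of_perm _ _ _ (fun a b h => h)
    ((PySem.List.sorted_perm z (fun s => s) false).append_right [x])

theorem pvGet?_sortD (g : PySem.Dict String (List String)) (y : String) :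
    (pvSortD g).get? y = (g.get? y).map pvSort1 := by
  simp [pvSortD, pvSortVals, PySem.Dict.get?, List.find?_map, Function.comp_def,
    Option.map_map]

theorem pvContains_sortD (g : PySem.Dict String (List String)) (y : String) :
    (pvSortD g).contains y = g.contains y := by
  simp [pvSortD, pvSortVals, PySem.Dict.contains, List.any_map, Function.comp_def]

theorem pvInsert_sortD (g : PySem.Dict String (List String)) (y : String) (v : List String) :
    (pvSortD g).insert y (pvSort1 v) = pvSortD (g.insert y v) := by
  simp only [PySem.Dict.insert, pvContains_sortD]
  by_cases h : g.contains y = true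
  · simp only [h, if_true]
    apply PySem.Dict.ext
    simp only [pvSortD, pvSortVals, List.map_map]
    apply List.map_congr_left
    intro p _
    by_cases hp : p.1 = y <;> simp [hp]
  · simp only [h]
    apply PySem.Dict.ext
    simp [pvSortD, pvSortVals]

theorem pvStep (g : PySem.Dict String (List String)) (y x : String) :
    pvAStep (pvSortD g) y x = pvSortD (pvBStep g y x) := by
  match g with
  | .mk [] => rfl
  | .mk (q :: t) =>
    have hne : ((pvSortD (PySem.Dict.mk (q :: t))) ==
        (PySem.Dict.empty : PySem.Dict String (List String))) = false := rfl
    simp only [pvAStep, pvBStep, PySem.Dict.modify, PySem.Dict.getD, hne, Bool.false_eq_true,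
      if_false, pvGet?_sortD]
    cases h : (PySem.Dict.mk (q :: t)).get? y with
    | none =>
      simpa [h] using pvInsert_sortD (PySem.Dict.mk (q :: t)) y [x]
    | some z =>
      have hz : PySem.List.sorted (pvSort1 z ++ [x]) (fun s => s) false = pvSort1 (z ++ [x]) :=
        pvSort1_again z x
      simpa [h, hz] using pvInsert_sortD (PySem.Dict.mk (q :: t)) y (z ++ [x])

theorem pvInner (ys : List String) (g : PySem.Dict String (List String)) (x : String) :
    ys.foldl (fun a y => pvAStep a y x) (pvSortD g)
      = pvSortD (ys.foldl (fun g y => pvBStep g y x) g) := by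
  induction ys generalizing g with
  | nil => rfl
  | cons y ys ih => simp only [List.foldl_cons, pvStep, ih]

-- the location index: lookup gives the matching city names in city order
theorem pvByLoc (city : List (String × String)) (loc : String) :
    (city.foldl (fun d yp => d.modify yp.2 [] (fun l => l ++ [yp.1]))
        (PySem.Dict.empty : PySem.Dict String (List String))).getD loc []
      = (city.filter (fun yp => loc == yp.2)).map Prod.fst := by
  have h1 : city.foldl (fun d yp => d.modify yp.2 [] (fun l => l ++ [yp.1]))
        (PySem.Dict.empty : PySem.Dict String (List String))
      = (city.map Prod.swap).foldl (fun d p => d.modify p.1 [] (fun l => l ++ [p.2]))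
        PySem.Dict.empty := by
    simp [List.foldl_map]
  rw [h1, PySem.Dict.getD_foldl_modify_append, PySem.Dict.getD_empty, List.filter_map]
  have h2 : ((fun p => p.1 == loc) ∘ (Prod.swap : String × String → String × String))
      = fun yp => loc == yp.2 := by
    funext yp; simp [Bool.beq_comm]
  rw [h2, List.map_map]
  rfl

-- a guarded fold is a fold over the filtered list
theorem pvFoldlGuard {α β : Type} (l : List β) (p : β → Bool) (f : α → β → α) (a : α) :
    l.foldl (fun a b => if p b then f a b else a) a = (l.filter p).foldl f a := by
  induction l generalizing a with
  | nil => rfl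
  | cons b l ih =>
    by_cases h : p b = true
    · simp [h, ih]
    · simp at h; simp [h, ih]

-- first-match lookup of a key of a duplicate-free dict
theorem pvGet?_self (l : List (String × String)) (hnd : (l.map Prod.fst).Nodup)
    {p : String × String} (hp : p ∈ l) : (PySem.Dict.mk l).get? p.1 = some p.2 := by
  obtain ⟨k, v⟩ := p
  exact PySem.Dict.get?_of_mem_items (PySem.Dict.mk l) hp
    (by simpa [PySem.Dict.keys] using hnd)

-- the combined army loop: A's side over the y-lists, against B's, in lockstep
theorem pvOuter (l : List (String × String)) (ys : (String × String) → List String)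
    (g : PySem.Dict String (List String)) :
    l.foldl (fun a xp => (ys xp).foldl (fun a y => pvAStep a y xp.1) a) (pvSortD g)
      = pvSortD (l.foldl (fun g xp => (ys xp).foldl (fun g y => pvBStep g y xp.1) g) g) := by
  induction l generalizing g with
  | nil => rfl
  | cons xp l ih => simp only [List.foldl_cons, pvInner, ih]

-- ===== VERDICT (by name: the statement is the Claim_ definition above) =====
theorem attacked_spec : Claim_equal_attacked := by
  intro att city _hdom hpre
  show attacked att city = attacked_alt att city
  unfold attacked attacked_alt
  have hA : att.foldl (fun a xp =>
      city.foldl (fun a yp =>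
        if ((PySem.Dict.mk att).get? xp.1 == (PySem.Dict.mk city).get? yp.1) then
          if a == (PySem.Dict.empty : PySem.Dict String (List String)) then
            PySem.Dict.ofList [(yp.1, [xp.1])]
          else
            let lst := match a.get? yp.1 with
              | none => [xp.1]
              | some z => z ++ [xp.1]
            a.insert yp.1 (PySem.List.sorted lst (fun s => s) false)
        else a) a) PySem.Dict.empty
      = att.foldl (fun a xp =>
          (((city.filter (fun yp => xp.2 == yp.2)).map Prod.fst).foldl
            (fun a y => pvAStep a y xp.1) a)) PySem.Dict.empty := by
    apply PySem.List.foldl_congr_mem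
    intro a xp hxp
    have hax : (PySem.Dict.mk att).get? xp.1 = some xp.2 := pvGet?_self att hpre.1 hxp
    have hcity : city.foldl (fun a yp =>
        if ((PySem.Dict.mk att).get? xp.1 == (PySem.Dict.mk city).get? yp.1) then
          pvAStep a yp.1 xp.1 else a) a
        = city.foldl (fun a yp => if (xp.2 == yp.2) then pvAStep a yp.1 xp.1 else a) a := by
      apply PySem.List.foldl_congr_mem
      intro a yp hyp
      rw [hax, pvGet?_self city hpre.2 hyp]
      simp
    calc city.foldl (fun a yp =>
        if ((PySem.Dict.mk att).get? xp.1 == (PySem.Dict.mk city).get? yp.1) then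
          if a == (PySem.Dict.empty : PySem.Dict String (List String)) then
            PySem.Dict.ofList [(yp.1, [xp.1])]
          else
            let lst := match a.get? yp.1 with
              | none => [xp.1]
              | some z => z ++ [xp.1]
            a.insert yp.1 (PySem.List.sorted lst (fun s => s) false)
        else a) a
        = city.foldl (fun a yp => if (xp.2 == yp.2) then pvAStep a yp.1 xp.1 else a) a := hcity
      _ = (city.filter (fun yp => xp.2 == yp.2)).foldl (fun a yp => pvAStep a yp.1 xp.1) a :=
          pvFoldlGuard city _ _ a
      _ = ((city.filter (fun yp => xp.2 == yp.2)).map Prod.fst).foldl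
            (fun a y => pvAStep a y xp.1) a := by rw [List.foldl_map]
  rw [hA]
  have hB : ∀ xp : String × String,
      ((city.foldl (fun d yp => d.modify yp.2 [] (fun l => l ++ [yp.1]))
        (PySem.Dict.empty : PySem.Dict String (List String))).getD xp.2 [])
      = (city.filter (fun yp => xp.2 == yp.2)).map Prod.fst := fun xp => pvByLoc city xp.2
  simp only [hB]
  have hout := pvOuter att
      (fun xp => (city.filter (fun yp => xp.2 == yp.2)).map Prod.fst)
      (PySem.Dict.mk [])
  simp only [pvBStep] at hout
  rw [show (PySem.Dict.empty : PySem.Dict String (List String)) = pvSortD (PySem.Dict.mk []) from rfl,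
    hout]
  rfl
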